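-- pv_equiv track=rewrite | github.com/geographika/gdalgviz | gdalgviz/gdalgviz.py | split_pipeline
-- ===== SOURCE A (Python) =====
-- from typing import List, Dict, Optional
--
-- def tokenize(text: str):
--     tokens = text.lstrip().split()
--     lowered = [t.lower() for t in tokens]
--     return tokens, lowered
--
-- def strip_prefix(text: str) -> str:
--     """
--     Remove any leading GDAL pipeline prefix
--     """
--     tokens, lowered = tokenize(text)
--
--     prefixes = [
--         ["gdal", "vector", "pipeline"],
--         ["gdal", "raster", "pipeline"],
--         ["gdal", "pipeline"],
--     ]
--
--     for prefix in prefixes: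
--         if lowered[: len(prefix)] == prefix:
--             return " ".join(tokens[len(prefix) :])
--
--     return text
--
-- def split_pipeline(command_line: str) -> List[str]:
--     """
--     Split a GDAL pipeline command_line into steps, handling nested brackets.
--     Returns a list where nested pipelines are represented as sublists.
--     """
--
--     command_line = strip_prefix(command_line)
--
--     steps = []
--     current = ""
--     stack = []  # track open brackets
--     i = 0
--     while i < len(command_line):
--         c = command_line[i]
--
--         if c == "[":
--             stack.append("[")
--             current += c
--         elif c == "]":
--             stack.pop()
--             current += c
--         elif c == "!" and not stack:
--             # end of step at this level
--             step = current.strip()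
--             if step:
--                 steps.append(step)
--             current = ""
--         else:
--             current += c
--         i += 1
--
--     if current.strip():
--         steps.append(current.strip())
--
--     return steps
-- ===== SOURCE B (Python) =====
-- from typing import List
--
-- def tokenize(text: str):
--     tokens = text.lstrip().split()
--     lowered = [t.lower() for t in tokens]
--     return tokens, lowered
--
-- def strip_prefix(text: str) -> str:
--     """
--     Remove any leading GDAL pipeline prefix
--     """
--     tokens, lowered = tokenize(text)
--
--     prefixes = [
--         ["gdal", "vector", "pipeline"],
--         ["gdal", "raster", "pipeline"],
--         ["gdal", "pipeline"],
--     ]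
--
--     for prefix in prefixes:
--         if lowered[: len(prefix)] == prefix:
--             return " ".join(tokens[len(prefix) :])
--
--     return text
--
-- def split_pipeline(command_line: str) -> List[str]:
--     """
--     Split on '!' first, then rejoin the pieces that fall inside brackets:
--     fold over the parts keeping a running bracket balance; a step ends at
--     every part boundary where the balance is back to zero.
--     """
--     command_line = strip_prefix(command_line)
--
--     steps = []
--     buf = None
--     bal = 0
--     for part in command_line.split("!"):
--         bal += part.count("[") - part.count("]")
--         buf = part if buf is None else buf + "!" + part
--         if bal == 0:
--             step = buf.strip()
--             if step:
--                 steps.append(step)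
--             buf = None
--     if buf is not None:
--         step = buf.strip()
--         if step:
--             steps.append(step)
--     return steps
-- ===== Notes on version B (the rewrite author's own statement) =====
-- stated objective: alternative
-- what changed: A scans character by character with an explicit bracket stack; B first splits the command line on '!' and then folds once over the parts with a running bracket balance, rejoining with '!' the parts that fall inside brackets and flushing a step whenever the balance returns to zero.
import Mathlib
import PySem

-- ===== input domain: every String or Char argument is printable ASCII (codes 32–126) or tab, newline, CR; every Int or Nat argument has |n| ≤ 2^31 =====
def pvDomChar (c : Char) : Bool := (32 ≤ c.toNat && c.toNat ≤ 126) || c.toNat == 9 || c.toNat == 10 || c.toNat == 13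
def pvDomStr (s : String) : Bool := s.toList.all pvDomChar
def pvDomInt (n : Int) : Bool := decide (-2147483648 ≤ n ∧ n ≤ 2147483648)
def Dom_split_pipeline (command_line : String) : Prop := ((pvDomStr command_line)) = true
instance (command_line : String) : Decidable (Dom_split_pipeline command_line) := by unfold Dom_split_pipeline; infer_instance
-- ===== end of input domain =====

-- B replaces A's character-by-character scan (explicit bracket stack) by a split on '!'
-- followed by a fold over the parts with a running bracket balance (objective: alternative decomposition).

-- ===== PORT A =====
-- shared helpers `tokenize` / `strip_prefix` (textually identical in Source A and Source B)
def tokenize (text : String) : List String × List String :=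
  let tokens := PySem.Str.split₀ (PySem.Str.lstrip text)
  (tokens, tokens.map PySem.Str.lower)

-- the `for prefix in prefixes` loop unrolled over the three literal prefixes, in order
def strip_prefix (text : String) : String :=
  if PySem.List.slice (tokenize text).2 none (some 3) = ["gdal", "vector", "pipeline"] then
    PySem.Str.join " " (PySem.List.slice (tokenize text).1 (some 3) none)
  else if PySem.List.slice (tokenize text).2 none (some 3) = ["gdal", "raster", "pipeline"] then
    PySem.Str.join " " (PySem.List.slice (tokenize text).1 (some 3) none)
  else if PySem.List.slice (tokenize text).2 none (some 2) = ["gdal", "pipeline"] then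
    PySem.Str.join " " (PySem.List.slice (tokenize text).1 (some 2) none)
  else text

-- A's while-loop over the characters; `stack.pop()` becomes `dropLast`
-- (Python raises IndexError on an empty stack there — those inputs are excluded by Pre_)
def loopA : List Char → List String → List Char → List Char → List String
  | [], steps, current, _stack =>
      let step := PySem.Chars.strip current
      if step.isEmpty then steps else steps ++ [String.ofList step]
  | c :: rest, steps, current, stack =>
      if c = '[' then loopA rest steps (current ++ [c]) (stack ++ ['['])
      else if c = ']' then loopA rest steps (current ++ [c]) stack.dropLast
      else if c = '!' ∧ stack = [] then
        let step := PySem.Chars.strip current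
        loopA rest (if step.isEmpty then steps else steps ++ [String.ofList step]) [] stack
      else loopA rest steps (current ++ [c]) stack

def split_pipeline (command_line : String) : List String :=
  loopA (strip_prefix command_line).toList [] [] []

-- ===== PORT B =====
def partBal (p : List Char) : Int :=
  (PySem.Chars.count p ['['] : Int) - (PySem.Chars.count p [']'] : Int)

-- B's `for part in command_line.split('!')` fold: running balance, optional buffer
def loopB : List (List Char) → List String → Option (List Char) → Int → List String
  | [], steps, buf, _bal =>
      match buf with
      | none => steps
      | some b =>
          let step := PySem.Chars.strip b
          if step.isEmpty then steps else steps ++ [String.ofList step]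
  | p :: ps, steps, buf, bal =>
      let bal' := bal + partBal p
      let buf' := match buf with
        | none => p
        | some b => b ++ '!' :: p
      if bal' = 0 then
        loopB ps
          (let step := PySem.Chars.strip buf'
           if step.isEmpty then steps else steps ++ [String.ofList step]) none bal'
      else loopB ps steps (some buf') bal'

def split_pipeline_alt (command_line : String) : List String :=
  loopB (PySem.Chars.splitOn ((strip_prefix command_line).toList) ['!']) [] none 0

-- ===== PRECONDITION & SPEC =====
-- Pre_ excludes exactly the inputs on which A raises IndexError (stack.pop() on an empty
-- stack): those where some prefix contains more ']' than '['.
def Pre_split_pipeline (command_line : String) : Prop :=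
  ∀ p ∈ command_line.toList.inits, p.count ']' ≤ p.count '['
instance (command_line : String) : Decidable (Pre_split_pipeline command_line) := by
  unfold Pre_split_pipeline; infer_instance

def pvWitness_split_pipeline : String := " read [a ! b] ! edit "

def Spec_split_pipeline (command_line : String) (out : List String) : Prop := out = split_pipeline_alt command_line
instance (command_line : String) (out : List String) : Decidable (Spec_split_pipeline command_line out) := by unfold Spec_split_pipeline; infer_instance

-- ===== CLAIM (what is proved, stated in full; the proofs are below) =====
def Claim_equal_split_pipeline : Prop := ∀ (command_line : String), Dom_split_pipeline command_line → Pre_split_pipeline command_line → Spec_split_pipeline command_line (split_pipeline command_line)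


-- ===== LEMMAS AND PROOFS =====

-- ---- bracket bookkeeping ----
def isBr (c : Char) : Bool := c == '[' || c == ']'
def brs (l : List Char) : List Char := l.filter isBr

-- recursive form of the prefix-balance condition
def okb : Nat → List Char → Bool
  | _, [] => true
  | n, c :: rest =>
      if c = '[' then okb (n + 1) rest
      else if c = ']' then (decide (0 < n)) && okb (n - 1) rest
      else okb n rest

-- bracket balance after scanning a block (meaningful when okb holds)
def balA : Nat → List Char → Nat
  | n, [] => n
  | n, c :: rest =>
      if c = '[' then balA (n + 1) rest
      else if c = ']' then balA (n - 1) rest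
      else balA n rest

theorem ok_iff (l : List Char) : ∀ n : Nat,
    (∀ p ∈ l.inits, p.count ']' ≤ n + p.count '[') ↔ okb n l = true := by
  induction l with
  | nil => intro n; simp [okb]
  | cons c l ih =>
    intro n
    have key : (∀ p ∈ (c :: l).inits, p.count ']' ≤ n + p.count '[')
        ↔ (∀ p ∈ l.inits, (c :: p).count ']' ≤ n + (c :: p).count '[') := by
      rw [List.inits_cons]
      constructor
      · intro h p hp
        exact h _ (List.mem_cons_of_mem _ (List.mem_map.2 ⟨p, hp, rfl⟩))
      · intro h p hp
        rcases List.mem_cons.1 hp with rfl | hp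
        · simp
        · rcases List.mem_map.1 hp with ⟨q, hq, rfl⟩
          exact h q hq
    rw [key]
    by_cases h1 : c = '['
    · subst h1
      rw [show okb n ('[' :: l) = okb (n + 1) l from by simp [okb], ← ih (n + 1)]
      constructor
      · intro h p hp; have := h p hp; simp [List.count_cons] at this ⊢ <;> omega
      · intro h p hp; have := h p hp; simp [List.count_cons] at this ⊢ <;> omega
    · by_cases h2 : c = ']'
      · subst h2
        rw [show okb n (']' :: l) = ((decide (0 < n)) && okb (n - 1) l) from by simp [okb],
          Bool.and_eq_true, decide_eq_true_iff, ← ih (n - 1)]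
        constructor
        · intro h
          have h0 := h [] (by simp)
          simp [List.count_cons] at h0
          refine ⟨by omega, fun p hp => ?_⟩
          have := h p hp; simp [List.count_cons] at this ⊢ <;> omega
        · rintro ⟨h0, h⟩ p hp
          have := h p hp; simp [List.count_cons] at this ⊢ <;> omega
      · rw [show okb n (c :: l) = okb n l from by simp [okb, h1, h2], ← ih n]
        constructor
        · intro h p hp; have := h p hp; simp [List.count_cons, h1, h2] at this ⊢; omega
        · intro h p hp; have := h p hp; simp [List.count_cons, h1, h2] at this ⊢; omega

theorem okb_append (a : List Char) : ∀ (n : Nat) (b : List Char),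
    okb n (a ++ b) = (okb n a && okb (balA n a) b) := by
  induction a with
  | nil => intro n b; simp [okb, balA]
  | cons c a ih =>
    intro n b
    by_cases h1 : c = '['
    · subst h1; simp [okb, balA, ih]
    · by_cases h2 : c = ']'
      · subst h2
        by_cases h0 : 0 < n
        · simp [okb, balA, h0, ih]
        · simp [okb, balA, h0]
      · simp [okb, balA, h1, h2, ih]

theorem okb_brs (l : List Char) : ∀ n, okb n l = okb n (brs l) := by
  induction l with
  | nil => intro n; simp [brs]
  | cons c l ih =>
    intro n
    by_cases h1 : c = '['
    · subst h1; simp [brs, okb, isBr, List.filter_cons, ih]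
    · by_cases h2 : c = ']'
      · subst h2; simp [brs, okb, isBr, List.filter_cons, ih]
      · simp [brs, okb, isBr, List.filter_cons, h1, h2, ih]

-- ---- strip_prefix preserves the bracket subsequence ----
theorem isBr_isspace {c : Char} (h : isBr c = true) : PySem.Chars.isspace c = false := by
  simp [isBr] at h
  rcases h with rfl | rfl <;> decide

theorem split₀_go_flatten (l : List Char) : ∀ (cur : List Char) (acc : List (List Char)),
    (PySem.Chars.split₀.go l cur acc).flatten
      = acc.reverse.flatten ++ cur.reverse ++ l.filter (fun c => !PySem.Chars.isspace c) := by
  induction l with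
  | nil =>
    intro cur acc
    by_cases h : cur.isEmpty
    · simp [PySem.Chars.split₀.go, h, List.isEmpty_iff.1 h]
    · simp [PySem.Chars.split₀.go, h]
  | cons c l ih =>
    intro cur acc
    by_cases hs : PySem.Chars.isspace c
    · by_cases h : cur.isEmpty
      · simp [PySem.Chars.split₀.go, hs, h, ih, List.isEmpty_iff.1 h, List.filter_cons]
      · simp [PySem.Chars.split₀.go, hs, h, ih, List.filter_cons]
    · simp [PySem.Chars.split₀.go, hs, ih, List.filter_cons]

theorem flatten_split₀ (l : List Char) :
    (PySem.Chars.split₀ l).flatten = l.filter (fun c => !PySem.Chars.isspace c) := by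
  simp [PySem.Chars.split₀, split₀_go_flatten]

theorem brs_filter_nonws (l : List Char) :
    brs (l.filter (fun c => !PySem.Chars.isspace c)) = brs l := by
  unfold brs
  rw [List.filter_filter]
  apply List.filter_congr
  intro c _
  by_cases hb : isBr c
  · simp [hb, isBr_isspace hb]
  · simp [hb]

theorem brs_dropWhile (l : List Char) : brs (l.dropWhile PySem.Chars.isspace) = brs l := by
  induction l with
  | nil => rfl
  | cons c l ih =>
    by_cases hs : PySem.Chars.isspace c
    · have hb : isBr c = false := by
        by_cases h : isBr c
        · rw [isBr_isspace h] at hs; cases hs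
        · simpa using h
      simp [List.dropWhile_cons, hs, ih, brs, List.filter_cons, hb]
      simpa [brs] using ih
    · simp [List.dropWhile_cons, hs]

theorem brs_flatten (L : List (List Char)) : brs L.flatten = (L.map brs).flatten := by
  induction L with
  | nil => rfl
  | cons p ps ih => simp [brs, List.filter_append] at *; simp [ih]

theorem brs_join (parts : List (List Char)) :
    brs (PySem.Chars.join [' '] parts) = (parts.map brs).flatten := by
  induction parts with
  | nil => simp [PySem.Chars.join_nil, brs]
  | cons p ps ih =>
    cases ps with
    | nil => simp [PySem.Chars.join_singleton, brs]
    | cons q qs =>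
      rw [PySem.Chars.join_cons_cons]
      unfold brs at *
      rw [List.filter_append, List.filter_append, ih]
      simp [show isBr ' ' = false from by decide]

theorem brs_nil_of_lower_mem {t : List Char}
    (h : String.ofList (PySem.Chars.lower t) ∈ (["gdal", "vector", "raster", "pipeline"] : List String)) :
    brs t = [] := by
  have hl : PySem.Chars.lower t = "gdal".toList ∨ PySem.Chars.lower t = "vector".toList ∨
      PySem.Chars.lower t = "raster".toList ∨ PySem.Chars.lower t = "pipeline".toList := by
    rcases List.mem_cons.1 h with h' | h'
    · exact Or.inl (by have := congrArg String.toList h'; simpa [String.toList_ofList] using this)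
    rcases List.mem_cons.1 h' with h'' | h''
    · exact Or.inr (Or.inl (by have := congrArg String.toList h''; simpa [String.toList_ofList] using this))
    rcases List.mem_cons.1 h'' with h3 | h3
    · exact Or.inr (Or.inr (Or.inl (by have := congrArg String.toList h3; simpa [String.toList_ofList] using this)))
    rcases List.mem_cons.1 h3 with h4 | h4
    · exact Or.inr (Or.inr (Or.inr (by have := congrArg String.toList h4; simpa [String.toList_ofList] using this)))
    · simp at h4
  unfold brs
  rw [List.filter_eq_nil_iff]
  intro c hc hbc
  have hcl : PySem.Chars.lowerChar c = c := by
    have hup : PySem.Chars.isupper c = false := by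
      simp [isBr] at hbc; rcases hbc with rfl | rfl <;> decide
    simp [PySem.Chars.lowerChar, hup]
  have hmem : c ∈ PySem.Chars.lower t := by
    simpa [PySem.Chars.lower] using List.mem_map.2 ⟨c, hc, hcl⟩
  simp [isBr] at hbc
  rcases hl with h' | h' | h' | h' <;> rw [h'] at hmem <;>
    rcases hbc with rfl | rfl <;> exact absurd hmem (by decide)

theorem brs_branch (tokensC : List (List Char)) (k : Nat)
    (hk : ∀ t ∈ tokensC.take k, brs t = []) :
    brs (PySem.Chars.join [' '] (List.drop k tokensC)) = brs tokensC.flatten := by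
  rw [brs_join, brs_flatten]
  have h1 : ((tokensC.take k).map brs).flatten = [] := by
    rw [List.flatten_eq_nil_iff]
    intro l hl
    rcases List.mem_map.1 hl with ⟨t, ht, rfl⟩
    exact hk t ht
  conv_rhs => rw [← List.take_append_drop k tokensC]
  rw [List.map_append, List.flatten_append, h1, List.nil_append]

theorem brs_strip_prefix (s : String) :
    brs (strip_prefix s).toList = brs s.toList := by
  have hbase : brs (PySem.Chars.split₀ (PySem.Chars.lstrip s.toList)).flatten = brs s.toList := by
    rw [flatten_split₀, brs_filter_nonws, PySem.Chars.lstrip, brs_dropWhile]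
  have htokens : PySem.Str.split₀ (PySem.Str.lstrip s)
      = List.map String.ofList (PySem.Chars.split₀ (PySem.Chars.lstrip s.toList)) := by
    simp [PySem.Str.split₀, PySem.Str.lstrip, String.toList_ofList]
  have hjoin : ∀ (k : Nat),
      (PySem.Str.join " " (PySem.List.slice (PySem.Str.split₀ (PySem.Str.lstrip s)) (some (k : Int)) none)).toList
        = PySem.Chars.join [' '] (List.drop k (PySem.Chars.split₀ (PySem.Chars.lstrip s.toList))) := by
    intro k
    rw [PySem.List.slice_from _ (by positivity), htokens]
    simp [PySem.Str.join, String.toList_ofList, List.map_drop, List.map_map, Function.comp_def]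
  have hlow : ∀ (k : Nat) (W : List String),
      PySem.List.slice (tokenize s).2 none (some (k : Int)) = W →
      (∀ w ∈ W, w ∈ (["gdal", "vector", "raster", "pipeline"] : List String)) →
      ∀ t ∈ (PySem.Chars.split₀ (PySem.Chars.lstrip s.toList)).take k, brs t = [] := by
    intro k W hW hWall t ht
    rw [PySem.List.slice_to _ (by positivity)] at hW
    simp only [tokenize, htokens] at hW
    apply brs_nil_of_lower_mem
    apply hWall
    rw [← hW]
    have : String.ofList (PySem.Chars.lower t)
        = PySem.Str.lower (String.ofList t) := by
      simp [PySem.Str.lower, String.toList_ofList]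
    rw [this]
    have hkk : (k : Int).toNat = k := by omega
    rw [hkk, ← List.map_take, ← List.map_take, List.map_map]
    exact List.mem_map.2 ⟨t, ht, rfl⟩
  unfold strip_prefix
  split_ifs with h1 h2 h3
  · rw [show (3 : Int) = ((3 : Nat) : Int) from rfl] at h1 ⊢
    rw [show (tokenize s).1 = PySem.Str.split₀ (PySem.Str.lstrip s) from rfl]
    rw [hjoin 3, brs_branch _ 3 (hlow 3 _ h1 (by decide)), hbase]
  · rw [show (3 : Int) = ((3 : Nat) : Int) from rfl] at h2 ⊢
    rw [show (tokenize s).1 = PySem.Str.split₀ (PySem.Str.lstrip s) from rfl]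
    rw [hjoin 3, brs_branch _ 3 (hlow 3 _ h2 (by decide)), hbase]
  · rw [show (2 : Int) = ((2 : Nat) : Int) from rfl] at h3 ⊢
    rw [show (tokenize s).1 = PySem.Str.split₀ (PySem.Str.lstrip s) from rfl]
    rw [hjoin 2, brs_branch _ 2 (hlow 2 _ h3 (by decide)), hbase]
  · rfl

-- ---- splitOn '!' as a structural splitter ----
def pySplit : List Char → List (List Char)
  | [] => [[]]
  | c :: rest =>
      if c = '!' then [] :: pySplit rest
      else
        match pySplit rest with
        | [] => [[c]]
        | q :: qs => (c :: q) :: qs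

theorem pySplit_exists_cons (l : List Char) : ∃ q qs, pySplit l = q :: qs := by
  induction l with
  | nil => exact ⟨[], [], rfl⟩
  | cons c rest ih =>
    by_cases h : c = '!'
    · exact ⟨[], pySplit rest, by simp [pySplit, h]⟩
    · rcases ih with ⟨q, qs, hq⟩
      exact ⟨c :: q, qs, by simp [pySplit, h, hq]⟩

theorem splitOn_go_eq (l : List Char) : ∀ (fuel : Nat) (cur : List Char) (acc : List (List Char)),
    l.length ≤ fuel →
    PySem.Chars.splitOn.go ['!'] fuel l cur acc
      = acc.reverse ++ (pySplit l).modifyHead (fun q => cur.reverse ++ q) := by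
  induction l with
  | nil =>
    intro fuel cur acc _
    cases fuel with
    | zero => simp [PySem.Chars.splitOn.go, pySplit]
    | succ f => simp [PySem.Chars.splitOn.go, pySplit]
  | cons c rest ih =>
    intro fuel cur acc hf
    cases fuel with
    | zero => simp at hf
    | succ f =>
      by_cases h : c = '!'
      · subst h
        rw [show PySem.Chars.splitOn.go ['!'] (f + 1) ('!' :: rest) cur acc
            = PySem.Chars.splitOn.go ['!'] f rest [] (cur.reverse :: acc) from by
          simp [PySem.Chars.splitOn.go, List.isPrefixOf]]
        rw [ih f [] (cur.reverse :: acc) (by simpa using Nat.le_of_succ_le_succ hf)]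
        obtain ⟨q, qs, hq⟩ := pySplit_exists_cons rest
        simp [pySplit, hq, List.modifyHead]
      · rw [show PySem.Chars.splitOn.go ['!'] (f + 1) (c :: rest) cur acc
            = PySem.Chars.splitOn.go ['!'] f rest (c :: cur) acc from by
          simp [PySem.Chars.splitOn.go, List.isPrefixOf, Ne.symm h]]
        rw [ih f (c :: cur) acc (by simpa using Nat.le_of_succ_le_succ hf)]
        obtain ⟨q, qs, hq⟩ := pySplit_exists_cons rest
        simp [pySplit, h, hq, List.modifyHead]

theorem splitOn_eq_pySplit (l : List Char) :
    PySem.Chars.splitOn l ['!'] = pySplit l := by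
  unfold PySem.Chars.splitOn
  rw [splitOn_go_eq l (l.length + 1) [] [] (by omega)]
  obtain ⟨q, qs, hq⟩ := pySplit_exists_cons l
  simp [hq, List.modifyHead]

-- ---- count on a single-character needle ----
theorem count_go_singleton (ch : Char) (l : List Char) : ∀ (fuel acc : Nat), l.length ≤ fuel →
    PySem.Chars.count.go [ch] fuel l acc = acc + l.count ch := by
  induction l with
  | nil =>
    intro fuel acc _
    cases fuel with
    | zero => simp [PySem.Chars.count.go]
    | succ f => simp [PySem.Chars.count.go]
  | cons c rest ih =>
    intro fuel acc hf
    cases fuel with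
    | zero => simp at hf
    | succ f =>
      by_cases h : ch = c
      · subst h
        rw [show PySem.Chars.count.go [ch] (f + 1) (ch :: rest) acc
            = PySem.Chars.count.go [ch] f rest (acc + 1) from by
          simp [PySem.Chars.count.go, List.isPrefixOf]]
        rw [ih f (acc + 1) (by simpa using Nat.le_of_succ_le_succ hf)]
        simp [List.count_cons]
        omega
      · rw [show PySem.Chars.count.go [ch] (f + 1) (c :: rest) acc
            = PySem.Chars.count.go [ch] f rest acc from by
          simp [PySem.Chars.count.go, List.isPrefixOf, h]]
        rw [ih f acc (by simpa using Nat.le_of_succ_le_succ hf)]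
        simp [List.count_cons, Ne.symm h]
  
theorem count_singleton (ch : Char) (l : List Char) :
    PySem.Chars.count l [ch] = l.count ch := by
  unfold PySem.Chars.count
  rw [if_neg (by simp)]
  simpa using count_go_singleton ch l l.length 0 (le_refl _)

theorem partBal_eq (p : List Char) :
    partBal p = ((p.count '[' : Int) - (p.count ']' : Int)) := by
  simp [partBal, count_singleton]

theorem balA_int (p : List Char) : ∀ n : Nat, okb n p = true →
    (balA n p : Int) = (n : Int) + ((p.count '[' : Int) - (p.count ']' : Int)) := by
  induction p with
  | nil => intro n _; simp [balA]
  | cons c p ih =>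
    intro n h
    by_cases h1 : c = '['
    · subst h1
      simp only [okb, if_pos rfl] at h
      rw [show balA n ('[' :: p) = balA (n + 1) p from by simp [balA], ih _ h]
      simp [List.count_cons]
      push_cast
      ring
    · by_cases h2 : c = ']'
      · subst h2
        have hh : 0 < n ∧ okb (n - 1) p = true := by
          by_cases h0 : 0 < n
          · exact ⟨h0, by simpa [okb, h0] using h⟩
          · simp [okb, h0] at h
        rcases hh with ⟨h0, h⟩
        rw [show balA n (']' :: p) = balA (n - 1) p from by simp [balA], ih _ h]
        simp [List.count_cons]
        push_cast [h0]
        omega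
      · rw [show balA n (c :: p) = balA n p from by simp [balA, h1, h2],
          ih _ (by simpa [okb, h1, h2] using h)]
        simp [List.count_cons, h1, h2]

-- ---- A's scan of a '!'-free block ----
theorem scanPart (p : List Char) : ∀ (rest : List Char) (steps : List String) (cur : List Char) (n : Nat),
    '!' ∉ p → okb n p = true →
    loopA (p ++ rest) steps cur (List.replicate n '[')
      = loopA rest steps (cur ++ p) (List.replicate (balA n p) '[') := by
  induction p with
  | nil => intro rest steps cur n _ _; simp [balA]
  | cons c p ih =>
    intro rest steps cur n hb h
    have hbp : '!' ∉ p := fun hx => hb (List.mem_cons_of_mem _ hx)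
    have hbc : c ≠ '!' := fun hx => hb (hx ▸ List.mem_cons_self ..)
    by_cases h1 : c = '['
    · subst h1
      simp only [okb, if_pos rfl] at h
      rw [List.cons_append, show loopA ('[' :: (p ++ rest)) steps cur (List.replicate n '[')
          = loopA (p ++ rest) steps (cur ++ ['[']) (List.replicate n '[' ++ ['[']) from by
        simp [loopA]]
      rw [← List.replicate_succ' (n := n), ih rest steps (cur ++ ['[']) (n + 1) hbp h]
      rw [show balA n ('[' :: p) = balA (n + 1) p from by simp [balA]]
      simp
    · by_cases h2 : c = ']'
      · subst h2
        have hh : 0 < n ∧ okb (n - 1) p = true := by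
          by_cases h0 : 0 < n
          · exact ⟨h0, by simpa [okb, h0] using h⟩
          · simp [okb, h0] at h
        rcases hh with ⟨h0, h⟩
        rw [List.cons_append, show loopA (']' :: (p ++ rest)) steps cur (List.replicate n '[')
            = loopA (p ++ rest) steps (cur ++ [']']) ((List.replicate n '[').dropLast) from by
          simp [loopA]]
        rw [List.dropLast_replicate, ih rest steps (cur ++ [']']) (n - 1) hbp h]
        rw [show balA n (']' :: p) = balA (n - 1) p from by simp [balA]]
        simp
      · rw [List.cons_append, show loopA (c :: (p ++ rest)) steps cur (List.replicate n '[')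
            = loopA (p ++ rest) steps (cur ++ [c]) (List.replicate n '[') from by
          simp [loopA, h1, h2, hbc]]
        rw [ih rest steps (cur ++ [c]) n hbp (by simpa [okb, h1, h2] using h)]
        rw [show balA n (c :: p) = balA n p from by simp [balA, h1, h2]]
        simp
    
-- ---- rejoin / pySplit ----
def rejoin : List (List Char) → List Char
  | [] => []
  | [p] => p
  | p :: ps => p ++ '!' :: rejoin ps

theorem rejoin_cons_cons (p q : List Char) (qs : List (List Char)) :
    rejoin (p :: q :: qs) = p ++ '!' :: rejoin (q :: qs) := by
  simp [rejoin]

theorem rejoin_pySplit (l : List Char) : rejoin (pySplit l) = l := by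
  induction l with
  | nil => rfl
  | cons c rest ih =>
    obtain ⟨q, qs, hq⟩ := pySplit_exists_cons rest
    by_cases h : c = '!'
    · subst h
      rw [show pySplit ('!' :: rest) = [] :: pySplit rest from by simp [pySplit], hq,
        rejoin_cons_cons, ← hq, ih]
      simp
    · rw [show pySplit (c :: rest) = (c :: q) :: qs from by simp [pySplit, h, hq]]
      cases qs with
      | nil =>
        rw [show rejoin [c :: q] = c :: q from rfl]
        rw [hq] at ih
        rw [show rejoin [q] = q from rfl] at ih
        rw [ih]
      | cons r rs =>
        rw [rejoin_cons_cons]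
        rw [hq] at ih
        rw [rejoin_cons_cons] at ih
        simp [ih]

theorem noBang_pySplit (l : List Char) : ∀ p ∈ pySplit l, '!' ∉ p := by
  induction l with
  | nil => simp [pySplit]
  | cons c rest ih =>
    obtain ⟨q, qs, hq⟩ := pySplit_exists_cons rest
    intro p hp
    by_cases h : c = '!'
    · subst h
      rw [show pySplit ('!' :: rest) = [] :: pySplit rest from by simp [pySplit]] at hp
      rcases List.mem_cons.1 hp with rfl | hp'
      · simp
      · exact ih p hp'
    · rw [show pySplit (c :: rest) = (c :: q) :: qs from by simp [pySplit, h, hq]] at hp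
      rcases List.mem_cons.1 hp with rfl | hp'
      · intro hx
        rcases List.mem_cons.1 hx with h' | h'
        · exact h h'.symm
        · exact ih q (by rw [hq]; exact List.mem_cons_self ..) h'
      · exact ih p (by rw [hq]; exact List.mem_cons_of_mem _ hp')

-- ---- the main part-by-part correspondence ----
theorem loopB_cons (p : List Char) (ps : List (List Char)) (steps : List String)
    (buf : Option (List Char)) (bal : Int) :
    loopB (p :: ps) steps buf bal =
      if bal + partBal p = 0 then
        loopB ps
          (if (PySem.Chars.strip
                (match buf with | none => p | some b => b ++ '!' :: p)).isEmpty then steps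
           else steps ++ [String.ofList (PySem.Chars.strip
                (match buf with | none => p | some b => b ++ '!' :: p))])
          none (bal + partBal p)
      else loopB ps steps (some (match buf with | none => p | some b => b ++ '!' :: p))
        (bal + partBal p) := by
  rfl

def curOf : Option (List Char) → List Char
  | none => []
  | some b => b ++ ['!']

theorem mainLoop (parts : List (List Char)) : ∀ (steps : List String) (buf : Option (List Char)) (n : Nat),
    parts ≠ [] → (∀ p ∈ parts, '!' ∉ p) → okb n (rejoin parts) = true →
    loopA (rejoin parts) steps (curOf buf) (List.replicate n '[')
      = loopB parts steps buf (n : Int) := by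
  induction parts with
  | nil => intro steps buf n h _ _; exact absurd rfl h
  | cons p ps ih =>
    intro steps buf n _ hb hok
    have hbp : '!' ∉ p := hb p (List.mem_cons_self ..)
    have hmerge : curOf buf ++ p = (match buf with | none => p | some b => b ++ '!' :: p) := by
      cases buf <;> simp [curOf]
    cases ps with
    | nil =>
      have hokp : okb n p = true := by simpa [rejoin] using hok
      have hbal : ((balA n p : Nat) : Int) = (n : Int) + partBal p := by
        rw [balA_int p n hokp, partBal_eq]
      rw [show rejoin [p] = p from rfl, ← List.append_nil p,
        scanPart p [] steps (curOf buf) n hbp hokp]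
      by_cases h0 : (n : Int) + partBal p = 0
      · simp only [loopB, h0, if_pos rfl, loopA, List.append_nil, hmerge]
        rfl
      · simp only [loopB, h0, if_neg h0, loopA, List.append_nil, hmerge]
        rfl
    | cons q qs =>
      rw [rejoin_cons_cons] at hok ⊢
      rw [okb_append, Bool.and_eq_true] at hok
      rcases hok with ⟨hokp, hok2⟩
      have hok3 : okb (balA n p) (rejoin (q :: qs)) = true := by
        simpa [okb] using hok2
      have hbal : ((balA n p : Nat) : Int) = (n : Int) + partBal p := by
        rw [balA_int p n hokp, partBal_eq]
      rw [scanPart p ('!' :: rejoin (q :: qs)) steps (curOf buf) n hbp hokp,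
        loopB_cons, ← hbal, ← hmerge]
      by_cases h0 : balA n p = 0
      · rw [if_pos (by exact_mod_cast h0), h0]
        have hih := ih (if (PySem.Chars.strip (curOf buf ++ p)).isEmpty then steps
            else steps ++ [String.ofList (PySem.Chars.strip (curOf buf ++ p))]) none 0
          (by simp) (fun x hx => hb x (List.mem_cons_of_mem _ hx)) (h0 ▸ hok3)
        rw [show curOf none = ([] : List Char) from rfl] at hih
        rw [← hih]
        simp [loopA]
      · have hz : ¬ ((balA n p : Nat) : Int) = 0 := by exact_mod_cast h0
        rw [if_neg hz]
        have hih := ih steps (some (curOf buf ++ p)) (balA n p)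
          (by simp) (fun x hx => hb x (List.mem_cons_of_mem _ hx)) hok3
        rw [← hih]
        simp [loopA, curOf, h0]

-- ---- assembling the claims ----
theorem okb_of_pre {s : String} (h : Pre_split_pipeline s) :
    okb 0 (strip_prefix s).toList = true := by
  have h0 : okb 0 s.toList = true := (ok_iff s.toList 0).1 (fun p hp => by simpa using h p hp)
  calc okb 0 (strip_prefix s).toList
      = okb 0 (brs (strip_prefix s).toList) := okb_brs _ 0
    _ = okb 0 (brs s.toList) := by rw [brs_strip_prefix]
    _ = okb 0 s.toList := (okb_brs _ 0).symm
    _ = true := h0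


-- ===== VERDICT (by name: the statement is the Claim_ definition above) =====
theorem split_pipeline_spec : Claim_equal_split_pipeline := by
  intro s _ hpre
  unfold Spec_split_pipeline split_pipeline split_pipeline_alt
  rw [splitOn_eq_pySplit]
  obtain ⟨q, qs, hq⟩ := pySplit_exists_cons (strip_prefix s).toList
  have := mainLoop (pySplit (strip_prefix s).toList) [] none 0
    (by rw [hq]; simp) (noBang_pySplit _)
    (by rw [rejoin_pySplit]; exact okb_of_pre hpre)
  rw [rejoin_pySplit] at this
  simpa [curOf] using this
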